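-- pv_equiv track=rewrite | github.com/lopezbaeza/Data-Science | basico/Ejercicios/Ejercicio_16.py | fun_contar_sexos
-- ===== SOURCE A (Python) =====
-- def fun_contar_sexos(data,valor1,valor2):
--     homb=0
--     muj=0
--
--     for persona in data[valor1]:
--         if persona==valor2:
--             homb+=1
--         else:
--             muj+=1
--     return homb,muj
-- ===== SOURCE B (Python) =====
-- def fun_contar_sexos(data, valor1, valor2):
--     # Build a frequency table of the column, then read the answer off the table.
--     counts = {}
--     for persona in data[valor1]:
--         counts[persona] = counts.get(persona, 0) + 1
--     homb = counts.get(valor2, 0)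
--     muj = 0
--     for k, c in counts.items():
--         if k != valor2:
--             muj += c
--     return homb, muj
-- ===== Notes on version B (the rewrite author's own statement) =====
-- stated objective: alternative
-- what changed: B builds a frequency dictionary of the column in one pass and then derives homb as the table entry for valor2 and muj as the sum of all other buckets, instead of A's single loop maintaining two parallel if/else counters.
import Mathlib
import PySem

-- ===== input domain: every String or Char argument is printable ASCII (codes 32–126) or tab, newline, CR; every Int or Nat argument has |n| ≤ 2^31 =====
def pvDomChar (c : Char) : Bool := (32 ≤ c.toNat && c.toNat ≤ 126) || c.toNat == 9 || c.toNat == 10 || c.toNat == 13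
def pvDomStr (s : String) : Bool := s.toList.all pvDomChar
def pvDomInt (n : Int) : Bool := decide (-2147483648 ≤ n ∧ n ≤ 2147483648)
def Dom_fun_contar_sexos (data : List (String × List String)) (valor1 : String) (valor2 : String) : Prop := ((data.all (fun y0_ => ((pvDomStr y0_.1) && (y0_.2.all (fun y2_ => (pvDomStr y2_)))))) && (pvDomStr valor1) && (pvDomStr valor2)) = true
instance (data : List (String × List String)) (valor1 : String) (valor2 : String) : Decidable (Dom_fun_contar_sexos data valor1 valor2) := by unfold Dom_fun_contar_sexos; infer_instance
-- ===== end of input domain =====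

-- B builds a frequency dictionary of the column in one pass and reads homb off the valor2 bucket
-- and muj as the sum of the other buckets, instead of A's if/else pair of counters (objective: alternative).

-- ===== PORT A =====
def fun_contar_sexos (data : List (String × List String)) (valor1 : String) (valor2 : String) : Int × Int :=
  let col := ((PySem.Dict.mk data).get? valor1).getD []   -- data[valor1]; Pre_ guarantees the key is present
  col.foldl (fun (p : Int × Int) persona =>
    if persona == valor2 then (p.1 + 1, p.2) else (p.1, p.2 + 1)) (0, 0)

-- ===== PORT B =====
def fun_contar_sexos_alt (data : List (String × List String)) (valor1 : String) (valor2 : String) : Int × Int :=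
  let col := ((PySem.Dict.mk data).get? valor1).getD []   -- data[valor1]; Pre_ guarantees the key is present
  -- counts[persona] = counts.get(persona, 0) + 1 over the column
  let counts : PySem.Dict String Int :=
    col.foldl (fun d persona => d.insert persona (d.getD persona 0 + 1)) PySem.Dict.empty
  let homb := counts.getD valor2 0
  -- for k, c in counts.items(): if k != valor2: muj += c
  let muj := counts.items.foldl (fun (m : Int) kc => if kc.1 ≠ valor2 then m + kc.2 else m) 0
  (homb, muj)

-- ===== PRECONDITION & SPEC =====
-- Pre_ excludes exactly the inputs where data[valor1] raises KeyError (valor1 not a key of data).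
def Pre_fun_contar_sexos (data : List (String × List String)) (valor1 : String) (valor2 : String) : Prop :=
  ((PySem.Dict.mk data).get? valor1).isSome = true
instance (data : List (String × List String)) (valor1 : String) (valor2 : String) : Decidable (Pre_fun_contar_sexos data valor1 valor2) := by unfold Pre_fun_contar_sexos; infer_instance

def pvWitness_fun_contar_sexos : (List (String × List String)) × String × String :=
  ([("sexo", ["H", "M", "H"])], "sexo", "H")

def Spec_fun_contar_sexos (data : List (String × List String)) (valor1 : String) (valor2 : String) (out : Int × Int) : Prop := out = fun_contar_sexos_alt data valor1 valor2
instance (data : List (String × List String)) (valor1 : String) (valor2 : String) (out : Int × Int) : Decidable (Spec_fun_contar_sexos data valor1 valor2 out) := by unfold Spec_fun_contar_sexos; infer_instance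

-- ===== CLAIM =====
def Claim_equal_fun_contar_sexos : Prop := ∀ (data : List (String × List String)) (valor1 : String) (valor2 : String), Dom_fun_contar_sexos data valor1 valor2 → Pre_fun_contar_sexos data valor1 valor2 → Spec_fun_contar_sexos data valor1 valor2 (fun_contar_sexos data valor1 valor2)

-- ===== LEMMAS AND PROOFS =====

-- A's two-counter loop computes (count of matches, length − count of matches).
theorem pv_foldl_two_counters (l : List String) (v : String) (h m : Int) :
    l.foldl (fun (p : Int × Int) persona =>
      if persona == v then (p.1 + 1, p.2) else (p.1, p.2 + 1)) (h, m)
    = (h + (l.count v : Int), m + ((l.length : Int) - (l.count v : Int))) := by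
  induction l generalizing h m with
  | nil => simp
  | cons x xs ih =>
    rw [List.foldl_cons]
    by_cases hx : (x == v) = true
    · rw [if_pos hx, ih]
      simp only [List.count_cons, hx, if_true, List.length_cons, Prod.mk.injEq]
      constructor <;> push_cast <;> ring
    · rw [if_neg hx, ih]
      simp only [List.count_cons, hx, if_false, List.length_cons, Prod.mk.injEq]
      constructor <;> push_cast <;> ring

-- B's items-loop is the sum of the second components of the non-valor2 items.
theorem pv_foldl_if_sum (l : List (String × Int)) (v : String) (a : Int) :
    l.foldl (fun (m : Int) kc => if kc.1 ≠ v then m + kc.2 else m) a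
    = a + ((l.filter (fun kc => kc.1 ≠ v)).map (·.2)).sum := by
  induction l generalizing a with
  | nil => simp
  | cons x xs ih =>
    by_cases hx : x.1 ≠ v
    · simp only [List.foldl_cons, if_pos hx, ih, List.filter_cons, decide_eq_true_iff, hx,
        if_true, List.map_cons, List.sum_cons]
      ring
    · simp only [List.foldl_cons, hx, if_false, ih, List.filter_cons, decide_eq_true_iff,
        if_neg hx]

-- Any nodup list with the same members as l.dedup is a permutation of it.
theorem pv_perm_dedup (l u : List String) (hnd : u.Nodup) (hmem : ∀ x, x ∈ u ↔ x ∈ l) :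
    u.Perm l.dedup := by
  refine (List.perm_ext_iff_of_nodup hnd (List.nodup_dedup l)).2 ?_
  intro a; rw [hmem, List.mem_dedup]

-- Summing the counts of the distinct non-v elements gives the number of non-v elements.
theorem pv_sum_counts_ne (l : List String) (v : String) :
    (((PySem.Set.ofList l).filter (fun k => k ≠ v)).map (fun k => (l.count k : Int))).sum
    = ((l.countP (fun p => p ≠ v) : Nat) : Int) := by
  have hperm : (PySem.Set.ofList l).Perm l.dedup :=
    pv_perm_dedup l _ (PySem.Set.nodup_ofList l) (PySem.Set.mem_ofList l)
  have h1 : (((PySem.Set.ofList l).filter (fun k => k ≠ v)).map (fun k => (l.count k : Int))).sum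
      = ((((l.dedup).filter (fun k => k ≠ v)).map (fun k => (l.count k : Int)))).sum :=
    List.Perm.sum_eq (List.Perm.map _ (List.Perm.filter _ hperm))
  rw [h1]
  have h2 := List.sum_map_count_dedup_filter_eq_countP (fun k => k ≠ v) l
  calc (((l.dedup).filter (fun k => k ≠ v)).map (fun k => (l.count k : Int))).sum
      = ((((l.dedup).filter (fun k => k ≠ v)).map (fun k => l.count k)).map
          (fun n : Nat => (n : Int))).sum := by rw [List.map_map]; rfl
    _ = ((((l.dedup).filter (fun k => k ≠ v)).map (fun k => l.count k)).sum : Nat) := by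
          rw [← Nat.cast_list_sum]
    _ = ((l.countP (fun p => p ≠ v) : Nat) : Int) := by rw [h2]

-- length − count v = countP (≠ v), over Nat, cast to Int.
theorem pv_length_sub_count (l : List String) (v : String) :
    ((l.length : Int) - (l.count v : Int)) = ((l.countP (fun p => p ≠ v) : Nat) : Int) := by
  induction l with
  | nil => simp
  | cons x xs ih =>
    by_cases hx : x = v
    · have h1 : (x == v) = true := by simp [hx]
      have h2 : (decide (x ≠ v)) = false := by simp [hx]
      rw [List.length_cons, List.count_cons, List.countP_cons, h1, h2]
      simp only [if_true, if_false, add_zero]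
      push_cast
      omega
    · have h1 : (x == v) = false := by simp [hx]
      have h2 : (decide (x ≠ v)) = true := by simp [hx]
      rw [List.length_cons, List.count_cons, List.countP_cons, h1, h2]
      simp only [if_true, if_false, add_zero]
      push_cast
      omega

-- ===== VERDICT =====
theorem fun_contar_sexos_spec : Claim_equal_fun_contar_sexos := by
  intro data valor1 valor2 _ _
  unfold Spec_fun_contar_sexos fun_contar_sexos fun_contar_sexos_alt
  simp only [PySem.Dict.foldl_insert_getD_add_one_eq_counter, PySem.Dict.getD_counter,
    PySem.Dict.items_counter, pv_foldl_two_counters, pv_foldl_if_sum, zero_add]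
  set col := ((PySem.Dict.mk data).get? valor1).getD [] with hcol
  refine Prod.ext rfl ?_
  have hfm : (List.map (fun k => (k, (col.count k : Int))) (PySem.Set.ofList col)).filter
        (fun kc => kc.1 ≠ valor2)
      = List.map (fun k => (k, (col.count k : Int))) ((PySem.Set.ofList col).filter
        (fun k => k ≠ valor2)) := by
    rw [List.filter_map]; rfl
  simp only [hfm, List.map_map]
  have : ((((PySem.Set.ofList col).filter (fun k => k ≠ valor2)).map
      ((fun kc : String × Int => kc.2) ∘ (fun k => (k, (col.count k : Int))))).sum)
      = (((PySem.Set.ofList col).filter (fun k => k ≠ valor2)).map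
        (fun k => (col.count k : Int))).sum := rfl
  rw [this, pv_sum_counts_ne, ← pv_length_sub_count]
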